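-- pv_equiv track=rewrite | github.com/sheena005/Tamper-Detection | tamper_detection_project/video_timeline.py | build_video_timeline
-- ===== SOURCE A (Python) =====
-- def build_video_timeline(total_frames, modified_frames):
--
--     timeline = []
--
--     for i in range(total_frames):
--
--         if i in modified_frames:
--             timeline.append((i, "TAMPERED"))
--         else:
--             timeline.append((i, "OK"))
--
--     return timeline
-- ===== SOURCE B (Python) =====
-- def build_video_timeline(total_frames, modified_frames):
--     timeline = [(i, "OK") for i in range(total_frames)]
--     for f in modified_frames:
--         if 0 <= f < total_frames:
--             timeline[f] = (f, "TAMPERED")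
--     return timeline
-- ===== Notes on version B (the rewrite author's own statement) =====
-- stated objective: alternative
-- what changed: Instead of A's single pass that scans modified_frames for every frame index, B builds the whole timeline as OK in one comprehension and then scatter-overwrites timeline[f] = (f, "TAMPERED") for each in-range f in modified_frames.
import Mathlib
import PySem

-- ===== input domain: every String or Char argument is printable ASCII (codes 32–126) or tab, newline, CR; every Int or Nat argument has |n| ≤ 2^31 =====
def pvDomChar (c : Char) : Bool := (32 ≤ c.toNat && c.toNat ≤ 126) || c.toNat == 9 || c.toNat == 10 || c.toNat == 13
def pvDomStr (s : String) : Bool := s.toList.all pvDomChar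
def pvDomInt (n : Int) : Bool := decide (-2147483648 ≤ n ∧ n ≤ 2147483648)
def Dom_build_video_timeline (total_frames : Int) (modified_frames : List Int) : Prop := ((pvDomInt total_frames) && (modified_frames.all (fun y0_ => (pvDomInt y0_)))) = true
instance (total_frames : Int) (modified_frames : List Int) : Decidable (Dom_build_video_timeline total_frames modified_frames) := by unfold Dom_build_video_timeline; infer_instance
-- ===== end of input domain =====

-- B builds the timeline as all-OK in one pass and then scatter-overwrites the in-range
-- tampered indices, replacing A's per-frame membership scan (objective: alternative decomposition).

-- ===== PORT A =====
def build_video_timeline (total_frames : Int) (modified_frames : List Int) : List (Int × String) :=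
  (PySem.List.pyRange 0 total_frames 1).foldl
    (fun timeline i =>
      if i ∈ modified_frames then timeline ++ [(i, "TAMPERED")]
      else timeline ++ [(i, "OK")]) []

-- ===== PORT B =====
def build_video_timeline_alt (total_frames : Int) (modified_frames : List Int) : List (Int × String) :=
  modified_frames.foldl
    (fun timeline f =>
      if 0 ≤ f ∧ f < total_frames then timeline.set f.toNat (f, "TAMPERED") else timeline)
    ((PySem.List.pyRange 0 total_frames 1).map (fun i => (i, "OK")))

-- ===== PRECONDITION & SPEC =====
def Spec_build_video_timeline (total_frames : Int) (modified_frames : List Int) (out : List (Int × String)) : Prop := out = build_video_timeline_alt total_frames modified_frames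
instance (total_frames : Int) (modified_frames : List Int) (out : List (Int × String)) : Decidable (Spec_build_video_timeline total_frames modified_frames out) := by unfold Spec_build_video_timeline; infer_instance

-- ===== CLAIM (what is proved, stated in full; the proofs are below) =====
def Claim_equal_build_video_timeline : Prop := ∀ (total_frames : Int) (modified_frames : List Int), Dom_build_video_timeline total_frames modified_frames → Spec_build_video_timeline total_frames modified_frames (build_video_timeline total_frames modified_frames)

-- ===== LEMMAS AND PROOFS =====

-- A's append-fold is a map over the range.
theorem foldl_append_map {α β : Type} (g : α → β) :
    ∀ (l : List α) (acc : List β),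
      l.foldl (fun tl i => tl ++ [g i]) acc = acc ++ l.map g := by
  intro l
  induction l with
  | nil => simp
  | cons a l ih => intro acc; simp [List.foldl, ih]

theorem portA_eq_map (total_frames : Int) (modified_frames : List Int) :
    build_video_timeline total_frames modified_frames =
      (PySem.List.pyRange 0 total_frames 1).map
        (fun i => (i, if i ∈ modified_frames then "TAMPERED" else "OK")) := by
  unfold build_video_timeline
  have hfun : (fun (timeline : List (Int × String)) (i : Int) =>
      if i ∈ modified_frames then timeline ++ [(i, "TAMPERED")] else timeline ++ [(i, "OK")]) =
      (fun tl i => tl ++ [(i, if i ∈ modified_frames then "TAMPERED" else "OK")]) := by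
    funext tl i
    by_cases hi : i ∈ modified_frames <;> simp [hi]
  rw [hfun, foldl_append_map]
  simp

-- setting index m of a map over range(0,n) rewrites the mapped function at m
theorem set_map_pyRange (n m : Int) (h0 : 0 ≤ m) (h1 : m < n)
    (g : Int → Int × String) (v : Int × String) :
    (((PySem.List.pyRange 0 n 1).map g).set m.toNat v) =
      (PySem.List.pyRange 0 n 1).map (fun i => if i = m then v else g i) := by
  apply List.ext_getElem
  · simp
  · intro k hk hk'
    have hkn : k < (n - 0).toNat := by
      simpa [PySem.List.length_pyRange_one] using hk'
    rw [List.getElem_set]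
    simp only [List.getElem_map, PySem.List.getElem_pyRange_one]
    by_cases hkm : m.toNat = k
    · have hik : (0 : Int) + (k : Int) = m := by omega
      simp [hkm, hik]
    · rw [if_neg hkm, if_neg (show ¬((0:Int) + (k:Int) = m) by omega)]

-- B's scatter fold over any starting status function
theorem scatter_eq_map (n : Int) :
    ∀ (ms : List Int) (st : Int → String),
      ms.foldl
        (fun tl f => if 0 ≤ f ∧ f < n then tl.set f.toNat (f, "TAMPERED") else tl)
        ((PySem.List.pyRange 0 n 1).map (fun i => (i, st i))) =
      (PySem.List.pyRange 0 n 1).map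
        (fun i => (i, if i ∈ ms then "TAMPERED" else st i)) := by
  intro ms
  induction ms with
  | nil => intro st; simp
  | cons m ms ih =>
    intro st
    simp only [List.foldl_cons]
    by_cases hm : 0 ≤ m ∧ m < n
    · rw [if_pos hm,
        set_map_pyRange n m hm.1 hm.2 (fun i => (i, st i)) (m, "TAMPERED")]
      have hb : (fun i : Int => if i = m then ((m, "TAMPERED") : Int × String) else (i, st i)) =
          (fun i : Int => (i, if i = m then "TAMPERED" else st i)) := by
        funext i
        by_cases h : i = m <;> simp [h]
      rw [hb, ih]
      apply List.map_congr_left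
      intro i hi
      by_cases h1 : i = m <;> by_cases h2 : i ∈ ms <;> simp [h1, h2]
    · rw [if_neg hm, ih]
      apply List.map_congr_left
      intro i hi
      have hir : 0 ≤ i ∧ i < n := by
        have := (PySem.List.mem_pyRange_one).1 hi
        exact this
      have hne : i ≠ m := by
        intro h; exact hm (h ▸ hir)
      by_cases h2 : i ∈ ms <;> simp [hne, h2]

-- ===== VERDICT (by name: the statement is the Claim_ definition above) =====
theorem build_video_timeline_spec : Claim_equal_build_video_timeline := by
  intro total_frames modified_frames _
  unfold Spec_build_video_timeline build_video_timeline_alt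
  rw [portA_eq_map, scatter_eq_map]
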